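-- pv_equiv track=rewrite | github.com/dorozhkinivan/project2_Dorozhkin_Ivan_M25-555 | src/primitive_db/parser.py | parse_set_clause
-- ===== SOURCE A (Python) =====
-- def clean_value(val: str) -> str:
--     """Удаляет лишние кавычки и запятые из значения."""
--     return val.strip('",\'')
--
-- def parse_set_clause(args: list[str]) -> dict:
--     """
--     Парсит часть команды для UPDATE (SET col = val).
--     Возвращает словарь изменений.
--     Останавливается, если встречает 'where'.
--     """
--     if "set" not in args:
--         return {}
--
--     start = args.index("set") + 1
--     end = args.index("where") if "where" in args else len(args)
--
--     set_part = args[start:end]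
--     updates = {}
--
--     # Проходим тройками: col = val
--     # Учитываем, что values могут склеиться или быть с запятыми
--     i = 0
--     while i < len(set_part) - 2:
--         col = set_part[i]
--         # set_part[i+1] должен быть "="
--         val = clean_value(set_part[i + 2])
--         updates[col] = val
--         i += 3  # переходим к следующей тройке или концу
--
--     return updates
-- ===== SOURCE B (Python) =====
-- def clean_value(val: str) -> str:
--     return val.strip('",\'')
--
--
-- def parse_set_clause(args: list[str]) -> dict:
--     """Single left-to-right pass: a small state machine instead of index()/slice/while."""
--     updates = {}
--     in_set = False
--     phase = 0
--     col = ""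
--     for tok in args:
--         if tok == "where":
--             break
--         if not in_set:
--             if tok == "set":
--                 in_set = True
--             continue
--         if phase == 0:
--             col = tok
--         elif phase == 2:
--             updates[col] = clean_value(tok)
--         phase = (phase + 1) % 3
--     return updates
-- ===== Notes on version B (the rewrite author's own statement) =====
-- stated objective: idiomatic
-- what changed: Replaced A's membership tests, two index() scans, a slice and an index-stepping while loop by a single left-to-right pass with a small state machine (before-set / in-set with a phase counter mod 3) that stops at the first 'where'.
import Mathlib
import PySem

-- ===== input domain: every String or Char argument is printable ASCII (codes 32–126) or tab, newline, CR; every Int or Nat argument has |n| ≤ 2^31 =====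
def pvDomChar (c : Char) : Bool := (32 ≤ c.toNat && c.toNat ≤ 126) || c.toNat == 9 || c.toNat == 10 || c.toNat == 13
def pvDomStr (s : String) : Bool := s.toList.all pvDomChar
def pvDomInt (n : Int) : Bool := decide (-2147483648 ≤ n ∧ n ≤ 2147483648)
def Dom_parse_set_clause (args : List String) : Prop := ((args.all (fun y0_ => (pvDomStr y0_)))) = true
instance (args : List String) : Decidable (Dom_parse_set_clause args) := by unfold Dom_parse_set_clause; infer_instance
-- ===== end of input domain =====

-- B replaces A's index()/slice/index-stepping while loop by one left-to-right state-machine pass (idiomatic, not faster).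

-- ===== PORT A =====
-- clean_value: val.strip('",\'')
def pyCleanValue (val : String) : String := PySem.Str.stripChars val "\",'"

-- the 'while i < len(set_part) - 2' loop (Nat i; for i ≥ 0 the Nat truncated subtraction
-- agrees with Python's int comparison). In-range indexing sp[i] is ported as getD (the
-- loop guard keeps i, i+2 < len, so the default is never used).
def psc_loopA (sp : List String) (i : Nat) (updates : PySem.Dict String String) :
    PySem.Dict String String :=
  if i < sp.length - 2 then
    psc_loopA sp (i + 3) (updates.insert (sp.getD i "") (pyCleanValue (sp.getD (i + 2) "")))
  else updates
termination_by sp.length - i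

def parse_set_clause (args : List String) : List (String × String) :=
  if "set" ∈ args then
    -- membership guard above guarantees index? is some; getD 0 never uses its default
    let start : Int := (((PySem.List.index? args "set").getD 0 : Nat) : Int) + 1
    let stop : Int :=
      if "where" ∈ args then (((PySem.List.index? args "where").getD 0 : Nat) : Int)
      else (args.length : Int)
    let set_part := PySem.List.slice args (some start) (some stop)
    (psc_loopA set_part 0 PySem.Dict.empty).items
  else ([] : List (String × String))

-- ===== PORT B =====
def psc_go : List String → Bool → Nat → String → PySem.Dict String String →
    PySem.Dict String String
  | [], _, _, _, updates => updates
  | tok :: rest, inSet, phase, col, updates =>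
    if tok = "where" then updates
    else if inSet = false then
      if tok = "set" then psc_go rest true 0 col updates
      else psc_go rest false 0 col updates
    else if phase = 0 then psc_go rest true 1 tok updates
    else if phase = 2 then psc_go rest true 0 col (updates.insert col (pyCleanValue tok))
    else psc_go rest true (phase + 1) col updates

def parse_set_clause_alt (args : List String) : List (String × String) :=
  (psc_go args false 0 "" PySem.Dict.empty).items

-- ===== PRECONDITION & SPEC =====
def Spec_parse_set_clause (args : List String) (out : List (String × String)) : Prop := out = parse_set_clause_alt args
instance (args : List String) (out : List (String × String)) : Decidable (Spec_parse_set_clause args out) := by unfold Spec_parse_set_clause; infer_instance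

-- ===== CLAIM (what is proved, stated in full; the proofs are below) =====
def Claim_equal_parse_set_clause : Prop := ∀ (args : List String), Dom_parse_set_clause args → Spec_parse_set_clause args (parse_set_clause args)

-- ===== LEMMAS AND PROOFS =====

-- triple-chunk evaluator both sides reduce to
def tripD : List String → PySem.Dict String String → PySem.Dict String String
  | a :: _ :: c :: rest, d => tripD rest (d.insert a (pyCleanValue c))
  | _, d => d

theorem loopA_eq_tripD (sp : List String) (i : Nat) (d : PySem.Dict String String) :
    psc_loopA sp i d = tripD (sp.drop i) d := by
  induction i, d using psc_loopA.induct sp with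
  | case1 i d h ih =>
    have h2 : i + 2 < sp.length := by omega
    have h0 : i < sp.length := by omega
    have h1 : i + 1 < sp.length := by omega
    rw [psc_loopA, if_pos h]
    rw [List.drop_eq_getElem_cons h0, List.drop_eq_getElem_cons h1,
      List.drop_eq_getElem_cons h2, tripD, ih]
    simp only [List.getD, List.getElem?_eq_getElem h0, List.getElem?_eq_getElem h2,
      Option.getD_some, show i + 2 + 1 = i + 3 by omega]
  | case2 i d h =>
    rw [psc_loopA, if_neg h]
    have : (sp.drop i).length < 3 := by rw [List.length_drop]; omega
    match hd : sp.drop i with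
    | [] => rfl
    | [_] => rfl
    | [_, _] => rfl
    | a :: b :: c :: r =>
      rw [hd] at this
      simp only [List.length_cons] at this
      exact absurd this (by omega)

-- B, before 'set' was seen, skips tokens that are neither 'set' nor 'where'
theorem go_skip_pre (pre : List String) (hs : "set" ∉ pre) (hw : "where" ∉ pre)
    (rest : List String) (col : String) (d : PySem.Dict String String) :
    psc_go (pre ++ rest) false 0 col d = psc_go rest false 0 col d := by
  induction pre with
  | nil => rfl
  | cons a t ih =>
    simp only [List.mem_cons, not_or] at hs hw
    have ha : a ≠ "set" := fun e => hs.1 e.symm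
    have hb : a ≠ "where" := fun e => hw.1 e.symm
    rw [List.cons_append, psc_go]
    simp only [ha, hb, if_false, if_true]
    exact ih hs.2 hw.2

-- B, when 'set' never occurs, returns the dictionary unchanged
theorem go_no_set (toks : List String) (hs : "set" ∉ toks) (col : String)
    (d : PySem.Dict String String) : psc_go toks false 0 col d = d := by
  induction toks with
  | nil => rfl
  | cons a t ih =>
    simp only [List.mem_cons, not_or] at hs
    have ha : a ≠ "set" := fun e => hs.1 e.symm
    rw [psc_go]
    by_cases hw : a = "where"
    · rw [if_pos hw]
    · rw [if_neg hw]; simp only [ha, if_false, if_true]; exact ih hs.2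

-- B, when a 'where' precedes any 'set', returns the dictionary unchanged
theorem go_where_pre (pre : List String) (hs : "set" ∉ pre) (hw : "where" ∈ pre)
    (rest : List String) (col : String) (d : PySem.Dict String String) :
    psc_go (pre ++ rest) false 0 col d = d := by
  induction pre with
  | nil => simp at hw
  | cons a t ih =>
    simp only [List.mem_cons, not_or] at hs
    have ha : a ≠ "set" := fun e => hs.1 e.symm
    rw [List.cons_append, psc_go]
    by_cases h : a = "where"
    · rw [if_pos h]
    · rw [if_neg h]; simp only [ha, if_false, if_true]
      rcases List.mem_cons.mp hw with h' | h'
      · exact absurd h'.symm h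
      · exact ih hs.2 h'

-- B, in set mode, consumes triples up to the first 'where'
theorem go_set_mode : ∀ (L : List String) (col : String) (d : PySem.Dict String String),
    psc_go L true 0 col d = tripD (L.takeWhile (fun t => t ≠ "where")) d
  | [], _, _ => rfl
  | [a], col, d => by
    by_cases h : a = "where" <;>
      simp [psc_go, tripD, List.takeWhile, h]
  | [a, b], col, d => by
    by_cases h : a = "where"
    · simp [psc_go, tripD, List.takeWhile, h]
    · by_cases h2 : b = "where" <;> simp [psc_go, tripD, List.takeWhile, h, h2]
  | a :: b :: c :: rest, col, d => by
    by_cases h : a = "where"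
    · simp [psc_go, tripD, List.takeWhile, h]
    · by_cases h2 : b = "where"
      · simp [psc_go, tripD, List.takeWhile, h, h2]
      · by_cases h3 : c = "where"
        · simp [psc_go, tripD, List.takeWhile, h, h2, h3]
        · rw [psc_go, if_neg h]
          simp only [if_neg (by decide : ¬ (true = false))]
          rw [psc_go, if_neg h2]
          simp only [if_neg (by decide : ¬ (true = false)),
            if_neg (by decide : ¬ ((1 : Nat) = 0)), if_neg (by decide : ¬ ((1 : Nat) = 2))]
          rw [psc_go, if_neg h3]
          simp only [if_neg (by decide : ¬ (true = false)),
            if_neg (by decide : ¬ ((2 : Nat) = 0))]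
          rw [go_set_mode rest]
          simp [List.takeWhile, h, h2, h3, tripD]

-- first-occurrence index turns take into takeWhile
theorem take_idx_eq_takeWhile (L : List String) (v : String) (k : Nat)
    (h : PySem.List.index? L v = some k) :
    L.take k = L.takeWhile (fun t => t ≠ v) := by
  rw [PySem.List.index?_eq_some_iff] at h
  obtain ⟨p, s, rfl, rfl, hv⟩ := h
  rw [List.take_left, List.takeWhile_append]
  rw [List.takeWhile_eq_self_iff.mpr (by intro x hx; simp; exact fun e => hv (e ▸ hx))]
  simp

theorem index?_append_right (pre t : List String) (v : String) (hv : v ∉ pre) :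
    PySem.List.index? (pre ++ t) v = (PySem.List.index? t v).map (· + pre.length) := by
  induction pre with
  | nil => simp [Option.map_id']
  | cons a p ih =>
    simp only [List.mem_cons, not_or] at hv
    rw [List.cons_append, PySem.List.index?_cons_of_ne (p ++ t) (fun e => hv.1 e.symm), ih hv.2]
    cases PySem.List.index? t v
    · simp
    · simp; omega

-- ===== VERDICT (by name: the statement is the Claim_ definition above) =====
theorem parse_set_clause_spec : Claim_equal_parse_set_clause := by
  intro args _
  unfold Spec_parse_set_clause parse_set_clause parse_set_clause_alt
  by_cases hset : "set" ∈ args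
  · rw [if_pos hset]
    obtain ⟨k, hk⟩ := (PySem.List.index?_isSome_iff (xs := args) (v := "set")).mpr hset
      |> Option.isSome_iff_exists.mp
    obtain ⟨pre, suf, rfl, rfl, hpre⟩ := (PySem.List.index?_eq_some_iff _ _ _).mp hk
    rw [hk]
    by_cases hwhere : "where" ∈ pre ++ "set" :: suf
    · rw [if_pos hwhere]
      by_cases hwp : "where" ∈ pre
      · -- 'where' before 'set': A slices an empty list, B stops before entering set mode
        obtain ⟨w, hw⟩ := (PySem.List.index?_isSome_iff (xs := pre) (v := "where")).mpr hwp
          |> Option.isSome_iff_exists.mp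
        have hwlt : w < pre.length := by
          rw [PySem.List.index?_eq_idxOf?] at hw
          exact List.idxOf?_eq_some_iff.mp hw |>.1
        rw [PySem.List.index?_append_of_mem _ hwp, hw]
        simp only [Option.getD_some]
        have : PySem.List.slice (pre ++ "set" :: suf)
            (some ((pre.length : Int) + 1)) (some (w : Int)) = [] := by
          have : ((pre.length : Int) + 1) = (((pre.length + 1 : Nat)) : Int) := by push_cast; ring
          rw [this, PySem.List.slice_natCast]
          have : w - (pre.length + 1) = 0 := by omega
          rw [this, List.take_zero]
        rw [this]
        rw [go_where_pre pre hpre hwp, loopA_eq_tripD]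
        rfl
      · -- 'where' first occurs inside the part after 'set'
        have hwsuf : "where" ∈ suf := by
          rcases List.mem_append.mp hwhere with h | h
          · exact absurd h hwp
          · rcases List.mem_cons.mp h with h | h
            · exact absurd h (by decide)
            · exact h
        obtain ⟨w, hw⟩ := (PySem.List.index?_isSome_iff (xs := suf) (v := "where")).mpr hwsuf
          |> Option.isSome_iff_exists.mp
        have hns : "where" ∉ pre ++ ["set"] := by
          simp [hwp]
        rw [show pre ++ "set" :: suf = (pre ++ ["set"]) ++ suf by simp,
          index?_append_right _ _ _ hns, hw]
        simp only [Option.map_some, Option.getD_some, List.length_append, List.length_cons,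
          List.length_nil]
        have hlen : (pre ++ ["set"]).length = pre.length + 1 := by simp
        have hsl : PySem.List.slice ((pre ++ ["set"]) ++ suf)
            (some ((pre.length : Int) + 1)) (some ((w + (pre ++ ["set"]).length : Nat) : Int)) =
            suf.take w := by
          have h1 : ((pre.length : Int) + 1) = (((pre.length + 1 : Nat)) : Int) := by push_cast; ring
          rw [h1, PySem.List.slice_natCast]
          rw [hlen]
          have h2 : w + (pre.length + 1) - (pre.length + 1) = w := by omega
          rw [h2]
          have h3 : ((pre ++ ["set"]) ++ suf).drop (pre.length + 1) = suf := by
            rw [← hlen, List.drop_left]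
          rw [h3]
        rw [show w + (pre.length + (0 + 1)) = w + (pre ++ ["set"]).length by simp]
        rw [hsl]
        rw [loopA_eq_tripD, List.drop_zero]
        rw [show (pre ++ ["set"]) ++ suf = pre ++ ("set" :: suf) by simp,
          go_skip_pre pre hpre hwp]
        rw [psc_go, if_neg (by decide : ¬ ("set" = "where")), if_pos rfl, if_pos rfl]
        rw [go_set_mode, take_idx_eq_takeWhile suf "where" w hw]
    · -- no 'where' at all
      rw [if_neg hwhere]
      simp only [Option.getD_some]
      have hwp : "where" ∉ pre := fun h => hwhere (List.mem_append.mpr (Or.inl h))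
      have hwsuf : "where" ∉ suf := fun h =>
        hwhere (List.mem_append.mpr (Or.inr (List.mem_cons.mpr (Or.inr h))))
      have hsl : PySem.List.slice (pre ++ "set" :: suf)
          (some ((pre.length : Int) + 1)) (some ((pre ++ "set" :: suf).length : Int)) = suf := by
        have h1 : ((pre.length : Int) + 1) = (((pre.length + 1 : Nat)) : Int) := by push_cast; ring
        rw [h1, PySem.List.slice_natCast]
        have h3 : (pre ++ "set" :: suf).drop (pre.length + 1) = suf := by
          rw [show pre ++ "set" :: suf = (pre ++ ["set"]) ++ suf by simp,
            show pre.length + 1 = (pre ++ ["set"]).length by simp, List.drop_left]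
        rw [h3, List.take_of_length_le (by simp; omega)]
      rw [hsl, loopA_eq_tripD, List.drop_zero]
      rw [go_skip_pre pre hpre hwp]
      rw [psc_go, if_neg (by decide : ¬ ("set" = "where")), if_pos rfl, if_pos rfl]
      rw [go_set_mode,
        List.takeWhile_eq_self_iff.mpr (by intro x hx; simp; exact fun e => hwsuf (e ▸ hx))]
  · rw [if_neg hset, go_no_set args hset]
    rfl
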